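-- pv_equiv track=rewrite | github.com/dudamarlena/pyc_source | pycfiles/autoversion_pbr-0.1.2-py2.7/__init__.py | sort_tags
-- ===== SOURCE A (Python) =====
-- def sort_tags(buckets, tags):
--     tags_by_branch = {}
--     tags_by_bucket = {}
--     for tag in tags:
--         for bucket, branch in buckets:
--             if str(tag).startswith(str(bucket) + '.'):
--                 break
--         else:
--             continue
--
--         tags_by_branch.setdefault(branch, []).append(tag)
--         tags_by_bucket.setdefault(bucket, []).append(tag)
--
--     for tags in tags_by_branch.values():
--         tags.sort()
--
--     for tags in tags_by_bucket.values():
--         tags.sort()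
--
--     return (
--      tags_by_branch, tags_by_bucket)
-- ===== SOURCE B (Python) =====
-- def sort_tags(buckets, tags):
--     # Index each bucket prefix once; per tag, look up its dotted prefixes and
--     # take the match with the smallest bucket index (= first match in buckets).
--     index = {}
--     for i, (bucket, branch) in enumerate(buckets):
--         key = str(bucket) + '.'
--         if key not in index:
--             index[key] = (i, bucket, branch)
--     tags_by_branch = {}
--     tags_by_bucket = {}
--     for tag in tags:
--         s = str(tag)
--         candidates = [index[s[:i + 1]] for i in range(len(s))
--                       if s[i] == '.' and s[:i + 1] in index]
--         if not candidates:
--             continue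
--         _, bucket, branch = min(candidates, key=lambda t: t[0])
--         tags_by_branch.setdefault(branch, []).append(tag)
--         tags_by_bucket.setdefault(bucket, []).append(tag)
--     return ({k: sorted(v) for k, v in tags_by_branch.items()},
--             {k: sorted(v) for k, v in tags_by_bucket.items()})
-- ===== Notes on version B (the rewrite author's own statement) =====
-- stated objective: faster
-- what changed: Instead of scanning all buckets for every tag, B builds a hash index from bucket prefix to (first index, bucket, branch) once, then for each tag looks up its dotted prefixes and takes the candidate with minimal bucket index.
import Mathlib
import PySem

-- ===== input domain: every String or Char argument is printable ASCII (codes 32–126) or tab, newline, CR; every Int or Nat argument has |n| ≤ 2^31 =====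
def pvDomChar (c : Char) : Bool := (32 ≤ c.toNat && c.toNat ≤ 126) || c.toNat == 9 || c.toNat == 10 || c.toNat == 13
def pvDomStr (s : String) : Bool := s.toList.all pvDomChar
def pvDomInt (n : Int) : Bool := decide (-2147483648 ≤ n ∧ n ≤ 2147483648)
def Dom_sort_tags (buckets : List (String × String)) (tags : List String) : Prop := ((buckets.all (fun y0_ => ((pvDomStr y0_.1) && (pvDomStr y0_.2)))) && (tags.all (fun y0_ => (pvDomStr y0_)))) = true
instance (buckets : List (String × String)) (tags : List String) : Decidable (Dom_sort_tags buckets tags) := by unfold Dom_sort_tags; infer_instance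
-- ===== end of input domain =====

-- B indexes buckets by prefix in a dict and picks each tag's minimal-index dotted-prefix match,
-- removing A's inner scan over all buckets per tag (objective: faster).


-- ===== PORT A =====
-- the inner 'for bucket, branch in buckets: if tag.startswith(bucket + "."): break / else: continue'
def sortTagsFindA (tag : List Char) : List (String × String) → Option (String × String)
  | [] => none
  | (bucket, branch) :: rest =>
      if PySem.Chars.startswith tag (bucket.toList ++ ['.']) then some (bucket, branch)
      else sortTagsFindA tag rest

-- one iteration of A's main loop: 'tags_by_branch.setdefault(branch, []).append(tag)' etc.
def sortTagsStepA (buckets : List (String × String))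
    (st : PySem.Dict String (List String) × PySem.Dict String (List String)) (tag : String) :
    PySem.Dict String (List String) × PySem.Dict String (List String) :=
  match sortTagsFindA tag.toList buckets with
  | none => st
  | some (bucket, branch) =>
      (st.1.modify branch [] (fun v => v ++ [tag]), st.2.modify bucket [] (fun v => v ++ [tag]))

def sort_tags (buckets : List (String × String)) (tags : List String) :
    (List (String × List String)) × (List (String × List String)) :=
  let st := tags.foldl (sortTagsStepA buckets) ((PySem.Dict.empty : PySem.Dict String (List String)), (PySem.Dict.empty : PySem.Dict String (List String)))
  -- 'for tags in d.values(): tags.sort()' sorts each value list in place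
  (st.1.items.map (fun kv => (kv.1, PySem.List.sorted kv.2 (fun x => x) false)),
   st.2.items.map (fun kv => (kv.1, PySem.List.sorted kv.2 (fun x => x) false)))

-- ===== PORT B =====
-- 'index[bucket + "."] = (i, bucket, branch)' for the first occurrence of each bucket prefix
def altIndexB (buckets : List (String × String)) : PySem.Dict (List Char) (Int × String × String) :=
  (PySem.List.enumerate buckets).foldl
    (fun d p =>
      if d.contains (p.2.1.toList ++ ['.']) then d
      else d.insert (p.2.1.toList ++ ['.']) (p.1, p.2.1, p.2.2))
    PySem.Dict.empty

-- '[index[s[:i+1]] for i in range(len(s)) if s[i] == "." and s[:i+1] in index]'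
def altCandidatesB (idx : PySem.Dict (List Char) (Int × String × String)) (s : List Char) :
    List (Int × String × String) :=
  (List.range s.length).filterMap
    (fun i => if s[i]? = some '.' then idx.get? (s.take (i + 1)) else none)

-- 'if not candidates: continue' / '_, bucket, branch = min(candidates, key=lambda t: t[0])'
def altSelectB (idx : PySem.Dict (List Char) (Int × String × String)) (s : List Char) :
    Option (String × String) :=
  match PySem.List.min? (altCandidatesB idx s) (fun t => t.1) with
  | none => none
  | some (_, bucket, branch) => some (bucket, branch)

def altStepB (idx : PySem.Dict (List Char) (Int × String × String))
    (st : PySem.Dict String (List String) × PySem.Dict String (List String)) (tag : String) :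
    PySem.Dict String (List String) × PySem.Dict String (List String) :=
  match altSelectB idx tag.toList with
  | none => st
  | some (bucket, branch) =>
      (st.1.modify branch [] (fun v => v ++ [tag]), st.2.modify bucket [] (fun v => v ++ [tag]))

def sort_tags_alt (buckets : List (String × String)) (tags : List String) :
    (List (String × List String)) × (List (String × List String)) :=
  let idx := altIndexB buckets
  let st := tags.foldl (altStepB idx) ((PySem.Dict.empty : PySem.Dict String (List String)), (PySem.Dict.empty : PySem.Dict String (List String)))
  -- '{k: sorted(v) for k, v in d.items()}'
  (st.1.items.map (fun kv => (kv.1, PySem.List.sorted kv.2 (fun x => x) false)),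
   st.2.items.map (fun kv => (kv.1, PySem.List.sorted kv.2 (fun x => x) false)))

-- ===== PRECONDITION & SPEC =====
def Spec_sort_tags (buckets : List (String × String)) (tags : List String) (out : (List (String × List String)) × (List (String × List String))) : Prop := out = sort_tags_alt buckets tags
instance (buckets : List (String × String)) (tags : List String) (out : (List (String × List String)) × (List (String × List String))) : Decidable (Spec_sort_tags buckets tags out) := by unfold Spec_sort_tags; infer_instance

-- ===== CLAIM (what is proved, stated in full; the proofs are below) =====
def Claim_equal_sort_tags : Prop := ∀ (buckets : List (String × String)) (tags : List String), Dom_sort_tags buckets tags → Spec_sort_tags buckets tags (sort_tags buckets tags)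

-- ===== LEMMAS AND PROOFS =====

theorem sortTagsFindA_append (s : List Char) (bs : List (String × String)) (p : String × String) :
    sortTagsFindA s (bs ++ [p])
      = (match sortTagsFindA s bs with
         | some r => some r
         | none => if PySem.Chars.startswith s (p.1.toList ++ ['.']) then some p else none) := by
  induction bs with
  | nil => simp [sortTagsFindA]
  | cons q t ih =>
      obtain ⟨b, br⟩ := q
      by_cases h : PySem.Chars.startswith s (b.toList ++ ['.']) = true
      · simp [sortTagsFindA, h]
      · simp only [List.cons_append, sortTagsFindA, if_neg h]
        exact ih

theorem sortTagsFindA_eq_none_iff (s : List Char) (bs : List (String × String)) :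
    sortTagsFindA s bs = none
      ↔ ∀ p ∈ bs, PySem.Chars.startswith s (p.1.toList ++ ['.']) = false := by
  induction bs with
  | nil => simp [sortTagsFindA]
  | cons q t ih =>
      obtain ⟨b, br⟩ := q
      by_cases h : PySem.Chars.startswith s (b.toList ++ ['.']) = true
      · simp only [sortTagsFindA, if_pos h]
        constructor
        · intro hc; exact absurd hc (by simp)
        · intro hall
          have := hall (b, br) (List.mem_cons_self ..)
          simp [h] at this
      · simp only [sortTagsFindA, if_neg h, ih, List.mem_cons]
        constructor
        · rintro hall p (rfl | hp)
          · simpa using h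
          · exact hall p hp
        · intro hall p hp; exact hall p (Or.inr hp)

theorem min?_foldl_aux {α : Type} (key : α → Int) :
    ∀ (t : List α) (a m : α), m ∈ a :: t → (∀ y ∈ a :: t, y ≠ m → key m < key y) →
      t.foldl (fun acc x => match acc with
        | none => some x
        | some c => if key x < key c then some x else some c) (some a) = some m := by
  intro t
  induction t with
  | nil =>
      intro a m hm _
      simp at hm
      simp [hm]
  | cons x t ih =>
      intro a m hm h
      have h' : ∀ y, (y = a ∨ y = x ∨ y ∈ t) → y ≠ m → key m < key y := by
        intro y hy hym
        exact h y (by simp [List.mem_cons]; tauto) hym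
      simp only [List.mem_cons] at hm
      simp only [List.foldl_cons]
      by_cases hx : key x < key a
      · simp only [if_pos hx]
        apply ih
        · simp only [List.mem_cons]
          rcases hm with rfl | rfl | hm'
          · by_cases hxm : x = m
            · exact Or.inl hxm.symm
            · have := h' x (by tauto) hxm
              omega
          · exact Or.inl rfl
          · exact Or.inr hm'
        · intro y hy hym
          simp only [List.mem_cons] at hy
          exact h' y (by tauto) hym
      · simp only [if_neg hx]
        apply ih
        · simp only [List.mem_cons]
          rcases hm with rfl | rfl | hm'
          · exact Or.inl rfl
          · by_cases ham : a = m
            · exact Or.inl ham.symm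
            · have := h' a (by tauto) ham
              omega
          · exact Or.inr hm'
        · intro y hy hym
          simp only [List.mem_cons] at hy
          exact h' y (by tauto) hym

theorem min?_eq_some_of_unique {α : Type} (key : α → Int) (xs : List α) (m : α)
    (hm : m ∈ xs) (h : ∀ y ∈ xs, y ≠ m → key m < key y) :
    PySem.List.min? xs key = some m := by
  cases xs with
  | nil => simp at hm
  | cons x t =>
      simp only [PySem.List.min?, List.foldl_cons]
      exact min?_foldl_aux key t x m hm h

theorem enumerate_append_singleton {α : Type} (xs : List α) (x : α) (start : Int) :
    PySem.List.enumerate (xs ++ [x]) start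
      = PySem.List.enumerate xs start ++ [(start + xs.length, x)] := by
  induction xs generalizing start with
  | nil => simp [PySem.List.enumerate]
  | cons y t ih => simp [PySem.List.enumerate, ih]; ring_nf

theorem mem_altCandidatesB (d : PySem.Dict (List Char) (Int × String × String)) (s : List Char)
    (x : Int × String × String) :
    x ∈ altCandidatesB d s
      ↔ ∃ i, i < s.length ∧ s[i]? = some '.' ∧ d.get? (s.take (i + 1)) = some x := by
  simp [altCandidatesB, List.mem_filterMap, List.mem_range, Option.ite_none_right_eq_some]

theorem startswith_iff_take (s bl : List Char) :
    PySem.Chars.startswith s (bl ++ ['.']) = true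
      ↔ bl.length < s.length ∧ s[bl.length]? = some '.' ∧ s.take (bl.length + 1) = bl ++ ['.'] := by
  rw [PySem.Chars.startswith_iff]
  constructor
  · intro hp
    have hlen : bl.length + 1 ≤ s.length := by simpa using hp.length_le
    have htake : s.take (bl.length + 1) = bl ++ ['.'] := by
      have := List.prefix_iff_eq_take.mp hp
      simpa using this.symm
    refine ⟨by omega, ?_, htake⟩
    have : (s.take (bl.length + 1))[bl.length]? = some '.' := by
      simp [htake]
    rwa [List.getElem?_take_of_lt (by omega)] at this
  · rintro ⟨hlt, hdot, htake⟩
    rw [← htake]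
    exact List.take_prefix _ _

theorem altIndexB_snoc (bs : List (String × String)) (p : String × String) :
    altIndexB (bs ++ [p])
      = (if (altIndexB bs).contains (p.1.toList ++ ['.']) then altIndexB bs
         else (altIndexB bs).insert (p.1.toList ++ ['.']) ((bs.length : Int), p.1, p.2)) := by
  simp [altIndexB, enumerate_append_singleton, List.foldl_append]

theorem altIndexB_inv (bs : List (String × String)) :
    (∀ k x, (altIndexB bs).get? k = some x → x.1 < (bs.length : Int) ∧ x.2.1.toList ++ ['.'] = k)
    ∧ (∀ k k' x y, (altIndexB bs).get? k = some x → (altIndexB bs).get? k' = some y →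
        x.1 = y.1 → k = k')
    ∧ (∀ k, (altIndexB bs).contains k = true ↔ ∃ p ∈ bs, p.1.toList ++ ['.'] = k) := by
  induction bs using List.reverseRecOn with
  | nil =>
      refine ⟨?_, ?_, ?_⟩ <;> simp [altIndexB, PySem.List.enumerate]
  | append_singleton bs p ih =>
      obtain ⟨ih1, ih2, ih3⟩ := ih
      rw [altIndexB_snoc] at *
      by_cases hc : (altIndexB bs).contains (p.1.toList ++ ['.']) = true
      · simp only [if_pos hc]
        refine ⟨?_, ih2, ?_⟩
        · intro k x hk
          have := ih1 k x hk
          constructor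
          · have : x.1 < (bs.length : Int) := this.1
            simp; omega
          · exact this.2
        · intro k
          rw [ih3]
          constructor
          · rintro ⟨q, hq, rfl⟩; exact ⟨q, by simp [hq], rfl⟩
          · rintro ⟨q, hq, rfl⟩
            simp only [List.mem_append, List.mem_singleton] at hq
            rcases hq with hq | rfl
            · exact ⟨q, hq, rfl⟩
            · -- contains key and key = q-prefix: from hc via ih3
              exact (ih3 _).mp hc
      · simp only [if_neg hc]
        have hfresh : (altIndexB bs).get? (p.1.toList ++ ['.']) = none := by
          rw [PySem.Dict.get?_eq_none_iff_contains]
          simpa using hc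
        refine ⟨?_, ?_, ?_⟩
        · intro k x hk
          rw [PySem.Dict.get?_insert] at hk
          split_ifs at hk with hkk
          · cases hk
            constructor
            · simp
            · simpa using hkk.symm
          · have := ih1 k x hk
            refine ⟨by have := this.1; simp; omega, this.2⟩
        · intro k k' x y hk hk' hxy
          rw [PySem.Dict.get?_insert] at hk hk'
          split_ifs at hk hk' with h1 h2 h2
          · rw [h1, h2]
          · cases hk
            have := ih1 k' y hk'
            have h1' := this.1
            simp at hxy
            omega
          · cases hk'
            have := ih1 k x hk
            have h1' := this.1
            simp at hxy
            omega
          · exact ih2 k k' x y hk hk' hxy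
        · intro k
          rw [PySem.Dict.contains_insert]
          simp only [Bool.or_eq_true, beq_iff_eq, ih3]
          constructor
          · rintro (rfl | ⟨q, hq, rfl⟩)
            · exact ⟨p, by simp, rfl⟩
            · exact ⟨q, by simp [hq], rfl⟩
          · rintro ⟨q, hq, rfl⟩
            simp only [List.mem_append, List.mem_singleton] at hq
            rcases hq with hq | rfl
            · exact Or.inr ⟨q, hq, rfl⟩
            · exact Or.inl rfl

theorem mem_altCandidatesB_insert (d : PySem.Dict (List Char) (Int × String × String))
    (s : List Char) (b br : String) (n : Int)
    (hfresh : d.get? (b.toList ++ ['.']) = none) (x : Int × String × String) :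
    x ∈ altCandidatesB (d.insert (b.toList ++ ['.']) (n, b, br)) s
      ↔ (PySem.Chars.startswith s (b.toList ++ ['.']) = true ∧ x = (n, b, br))
        ∨ x ∈ altCandidatesB d s := by
  rw [mem_altCandidatesB, mem_altCandidatesB]
  constructor
  · rintro ⟨i, hi, hdot, hget⟩
    rw [PySem.Dict.get?_insert] at hget
    split_ifs at hget with hkk
    · cases hget
      left
      refine ⟨?_, rfl⟩
      rw [PySem.Chars.startswith_iff, ← hkk]
      exact List.take_prefix _ _
    · exact Or.inr ⟨i, hi, hdot, hget⟩
  · rintro (⟨hs, rfl⟩ | ⟨i, hi, hdot, hget⟩)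
    · rw [startswith_iff_take] at hs
      obtain ⟨hlt, hdot, htake⟩ := hs
      refine ⟨b.toList.length, hlt, hdot, ?_⟩
      rw [PySem.Dict.get?_insert, if_pos htake]
    · refine ⟨i, hi, hdot, ?_⟩
      rw [PySem.Dict.get?_insert]
      split_ifs with hkk
      · rw [hkk, hfresh] at hget; cases hget
      · exact hget

theorem altSelectB_eq (buckets : List (String × String)) (s : List Char) :
    altSelectB (altIndexB buckets) s = sortTagsFindA s buckets := by
  induction buckets using List.reverseRecOn with
  | nil =>
      simp [altSelectB, altCandidatesB, altIndexB, PySem.List.enumerate, sortTagsFindA,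
        PySem.List.min?]
  | append_singleton bs p ih =>
      obtain ⟨inv1, inv2, inv3⟩ := altIndexB_inv bs
      rw [altIndexB_snoc, sortTagsFindA_append]
      by_cases hc : (altIndexB bs).contains (p.1.toList ++ ['.']) = true
      · rw [if_pos hc, ih]
        cases hfind : sortTagsFindA s bs with
        | some r => rfl
        | none =>
            obtain ⟨q, hq, hkey⟩ := (inv3 _).mp hc
            have := (sortTagsFindA_eq_none_iff s bs).mp hfind q hq
            rw [hkey] at this
            simp [this]
      · rw [if_neg hc]
        have hfresh : (altIndexB bs).get? (p.1.toList ++ ['.']) = none := by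
          rw [PySem.Dict.get?_eq_none_iff_contains]; simpa using hc
        cases hfind : sortTagsFindA s bs with
        | some r =>
            have hsel : altSelectB (altIndexB bs) s = some r := by rw [ih, hfind]
            -- min? over the old candidates is some m
            unfold altSelectB at hsel ⊢
            cases hmin : PySem.List.min? (altCandidatesB (altIndexB bs) s) (fun t => t.1) with
            | none => rw [hmin] at hsel; cases hsel
            | some m =>
                rw [hmin] at hsel
                have hmem := PySem.List.min?_mem hmin
                have hmin' : PySem.List.min?
                    (altCandidatesB ((altIndexB bs).insert (p.1.toList ++ ['.'])
                      ((bs.length : Int), p.1, p.2)) s) (fun t => t.1) = some m := by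
                  apply min?_eq_some_of_unique
                  · rw [mem_altCandidatesB_insert _ _ _ _ _ hfresh]
                    exact Or.inr hmem
                  · intro y hy hym
                    rw [mem_altCandidatesB_insert _ _ _ _ _ hfresh] at hy
                    rcases hy with ⟨_, rfl⟩ | hy
                    · obtain ⟨i, hi, hdot, hget⟩ := (mem_altCandidatesB _ _ _).mp hmem
                      have := (inv1 _ _ hget).1
                      simpa using this
                    · have hle := PySem.List.min?_isMin hmin y hy
                      by_contra hcon
                      push Not at hcon
                      have hxy : m.1 = y.1 := le_antisymm hle hcon
                      obtain ⟨i, hi, hdot, hget⟩ := (mem_altCandidatesB _ _ _).mp hmem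
                      obtain ⟨j, hj, hdotj, hgetj⟩ := (mem_altCandidatesB _ _ _).mp hy
                      have hk := inv2 _ _ _ _ hget hgetj hxy
                      rw [hk, hgetj] at hget
                      cases hget
                      exact hym rfl
                rw [hmin']
                exact hsel
        | none =>
            have hsel : altSelectB (altIndexB bs) s = none := by rw [ih, hfind]
            unfold altSelectB at hsel ⊢
            cases hmin : PySem.List.min? (altCandidatesB (altIndexB bs) s) (fun t => t.1) with
            | some m => rw [hmin] at hsel; obtain ⟨_, _, _⟩ := m; cases hsel
            | none =>
                have hC : altCandidatesB (altIndexB bs) s = [] :=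
                  (PySem.List.min?_eq_none_iff _ _).mp hmin
                by_cases hs : PySem.Chars.startswith s (p.1.toList ++ ['.']) = true
                · have hv : ∀ x ∈ altCandidatesB ((altIndexB bs).insert (p.1.toList ++ ['.'])
                      ((bs.length : Int), p.1, p.2)) s, x = ((bs.length : Int), p.1, p.2) := by
                    intro x hx
                    rw [mem_altCandidatesB_insert _ _ _ _ _ hfresh] at hx
                    rcases hx with ⟨_, rfl⟩ | hx
                    · rfl
                    · rw [hC] at hx; cases hx
                  have hvm : ((bs.length : Int), p.1, p.2) ∈ altCandidatesB
                      ((altIndexB bs).insert (p.1.toList ++ ['.'])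
                        ((bs.length : Int), p.1, p.2)) s := by
                    rw [mem_altCandidatesB_insert _ _ _ _ _ hfresh]
                    exact Or.inl ⟨hs, rfl⟩
                  have hmin' := min?_eq_some_of_unique (fun t => t.1) _ _ hvm
                    (fun y hy hym => absurd (hv y hy) hym)
                  rw [hmin', if_pos hs]
                · have hC' : altCandidatesB ((altIndexB bs).insert (p.1.toList ++ ['.'])
                      ((bs.length : Int), p.1, p.2)) s = [] := by
                    rw [List.eq_nil_iff_forall_not_mem]
                    intro x hx
                    rw [mem_altCandidatesB_insert _ _ _ _ _ hfresh] at hx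
                    rcases hx with ⟨h1, _⟩ | hx
                    · exact hs h1
                    · rw [hC] at hx; cases hx
                  rw [hC']
                  simp [PySem.List.min?, hs]

theorem sort_tags_eq (buckets : List (String × String)) (tags : List String) :
    sort_tags buckets tags = sort_tags_alt buckets tags := by
  have hstep : sortTagsStepA buckets = altStepB (altIndexB buckets) := by
    funext st tag
    simp [sortTagsStepA, altStepB, altSelectB_eq]
  simp [sort_tags, sort_tags_alt, hstep]

-- ===== VERDICT (by name: the statement is the Claim_ definition above) =====
theorem sort_tags_spec : Claim_equal_sort_tags := by
  intro buckets tags _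
  unfold Spec_sort_tags
  exact sort_tags_eq buckets tags
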